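-- pv_equiv track=rewrite | github.com/zhufengya/Test | pytest/test1.py | symbol
-- ===== SOURCE A (Python) =====
-- def symbol(st):
--     cunt = [0,0,0,0]
--     for letter in st:
--         if letter.isdigit():
--             cunt[0] = 1
--         elif letter.isupper():
--             cunt[1] = 1
--         elif letter.islower():
--             cunt[2] = 1
--         else:
--             cunt[3] = 1
--     return sum(cunt)
-- ===== SOURCE B (Python) =====
-- def symbol(st):
--     return (any(c.isdigit() for c in st)
--             + any(c.isupper() for c in st)
--             + any(c.islower() for c in st)
--             + any(not (c.isdigit() or c.isupper() or c.islower()) for c in st))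
-- ===== Notes on version B (the rewrite author's own statement) =====
-- stated objective: idiomatic
-- what changed: Replaced the single elif-branching loop that mutates a flag array with four independent short-circuiting any() presence checks summed; valid since the categories are mutually exclusive per character.
import Mathlib
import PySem

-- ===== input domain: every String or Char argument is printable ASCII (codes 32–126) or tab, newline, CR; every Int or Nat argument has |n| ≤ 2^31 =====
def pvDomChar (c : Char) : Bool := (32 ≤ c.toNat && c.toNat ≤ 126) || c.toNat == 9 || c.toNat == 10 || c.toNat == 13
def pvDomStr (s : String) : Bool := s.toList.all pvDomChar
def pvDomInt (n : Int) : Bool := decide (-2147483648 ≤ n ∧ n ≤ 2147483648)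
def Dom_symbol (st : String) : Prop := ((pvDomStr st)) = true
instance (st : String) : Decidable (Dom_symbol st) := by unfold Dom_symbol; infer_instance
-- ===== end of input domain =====

-- B replaces A's single elif-branching loop over a flag array with four independent
-- short-circuiting presence checks summed (idiomatic; same O(n) cost).

-- ===== PORT A =====
-- one pass; a 4-tuple of Int flags mirrors the list cunt = [0,0,0,0]
def symbol (st : String) : Int :=
  let cunt := st.toList.foldl
    (fun (cunt : Int × Int × Int × Int) letter =>
      if PySem.Chars.isdigit letter then (1, cunt.2.1, cunt.2.2.1, cunt.2.2.2)
      else if PySem.Chars.isupper letter then (cunt.1, 1, cunt.2.2.1, cunt.2.2.2)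
      else if PySem.Chars.islower letter then (cunt.1, cunt.2.1, 1, cunt.2.2.2)
      else (cunt.1, cunt.2.1, cunt.2.2.1, 1))
    (0, 0, 0, 0)
  cunt.1 + cunt.2.1 + cunt.2.2.1 + cunt.2.2.2

-- ===== PORT B =====
-- four any(...) presence checks, summed (bools count as 0/1 as in Python)
def symbol_alt (st : String) : Int :=
  (if st.toList.any (fun c => PySem.Chars.isdigit c) then (1:Int) else 0)
  + (if st.toList.any (fun c => PySem.Chars.isupper c) then (1:Int) else 0)
  + (if st.toList.any (fun c => PySem.Chars.islower c) then (1:Int) else 0)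
  + (if st.toList.any (fun c =>
        !(PySem.Chars.isdigit c || PySem.Chars.isupper c || PySem.Chars.islower c)) then (1:Int) else 0)

-- ===== PRECONDITION & SPEC =====
def Spec_symbol (st : String) (out : Int) : Prop := out = symbol_alt st
instance (st : String) (out : Int) : Decidable (Spec_symbol st out) := by unfold Spec_symbol; infer_instance

-- ===== CLAIM (what is proved, stated in full; the proofs are below) =====
def Claim_equal_symbol : Prop := ∀ (st : String), Dom_symbol st → Spec_symbol st (symbol st)

-- ===== LEMMAS AND PROOFS =====

-- the three character categories are pairwise disjoint
theorem pv_digit_not_upper (c : Char) (h : PySem.Chars.isdigit c = true) :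
    PySem.Chars.isupper c = false := by
  simp [PySem.Chars.isdigit, PySem.Chars.isupper, Char.le_def, UInt32.le_iff_toNat_le] at *
  omega

theorem pv_digit_not_lower (c : Char) (h : PySem.Chars.isdigit c = true) :
    PySem.Chars.islower c = false := by
  simp [PySem.Chars.isdigit, PySem.Chars.islower, Char.le_def, UInt32.le_iff_toNat_le] at *
  omega

theorem pv_upper_not_lower (c : Char) (h : PySem.Chars.isupper c = true) :
    PySem.Chars.islower c = false := by
  simp [PySem.Chars.isupper, PySem.Chars.islower, Char.le_def, UInt32.le_iff_toNat_le] at *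
  omega

-- characterisation of A's flag-setting loop, for arbitrary starting flags
theorem pv_foldl_flags (l : List Char) (a b c d : Int) :
    l.foldl
      (fun (cunt : Int × Int × Int × Int) letter =>
        if PySem.Chars.isdigit letter then (1, cunt.2.1, cunt.2.2.1, cunt.2.2.2)
        else if PySem.Chars.isupper letter then (cunt.1, 1, cunt.2.2.1, cunt.2.2.2)
        else if PySem.Chars.islower letter then (cunt.1, cunt.2.1, 1, cunt.2.2.2)
        else (cunt.1, cunt.2.1, cunt.2.2.1, 1))
      (a, b, c, d)
    = ((if l.any (fun x => PySem.Chars.isdigit x) then 1 else a),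
       (if l.any (fun x => PySem.Chars.isupper x) then 1 else b),
       (if l.any (fun x => PySem.Chars.islower x) then 1 else c),
       (if l.any (fun x =>
           !(PySem.Chars.isdigit x || PySem.Chars.isupper x || PySem.Chars.islower x)) then 1 else d)) := by
  induction l generalizing a b c d with
  | nil => simp
  | cons x xs ih =>
    simp only [List.foldl_cons, List.any_cons]
    by_cases hd : PySem.Chars.isdigit x = true
    · simp [hd, ih, pv_digit_not_upper x hd, pv_digit_not_lower x hd]
    · by_cases hu : PySem.Chars.isupper x = true
      · simp [hd, hu, ih, pv_upper_not_lower x hu]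
      · by_cases hl : PySem.Chars.islower x = true
        · simp [hd, hu, hl, ih]
        · simp [hd, hu, hl, ih]

-- ===== VERDICT (by name: the statement is the Claim_ definition above) =====
theorem symbol_spec : Claim_equal_symbol := by
  intro st _
  unfold Spec_symbol symbol symbol_alt
  simp only [pv_foldl_flags]
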